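-- pv_equiv track=rewrite | github.com/jjcastells/amazon-ads-auto-report | amz-reporting.py | detect_many_tokens
-- ===== SOURCE A (Python) =====
-- def detect_many_tokens(value: str, token_map: dict[str, list[str]]) -> list[str]:
--     if value is None:
--         return []
--     haystack = str(value).upper()
--     found = []
--     for canon, aliases in token_map.items():
--         for a in aliases:
--             if a and a in haystack:
--                 found.append(canon)
--                 break
--     return found
-- ===== SOURCE B (Python) =====
-- def detect_many_tokens(value, token_map):
--     if value is None:
--         return []
--     haystack = str(value).upper()
--     # index every substring of haystack (up to the longest alias) once,
--     # then each alias test is a single hash lookup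
--     maxlen = 0
--     for aliases in token_map.values():
--         for a in aliases:
--             maxlen = max(maxlen, len(a))
--     subs = {haystack[i:i + l + 1] for i in range(len(haystack)) for l in range(maxlen)}
--     return [canon for canon, aliases in token_map.items() if any(a in subs for a in aliases)]
-- ===== Notes on version B (the rewrite author's own statement) =====
-- stated objective: alternative
-- what changed: Instead of running a substring search for every alias separately, B builds a set of all substrings of the haystack up to the longest alias length once, and then tests each alias by a single set lookup; the output is produced by a filter comprehension over the map instead of an append/break loop.
import Mathlib
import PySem

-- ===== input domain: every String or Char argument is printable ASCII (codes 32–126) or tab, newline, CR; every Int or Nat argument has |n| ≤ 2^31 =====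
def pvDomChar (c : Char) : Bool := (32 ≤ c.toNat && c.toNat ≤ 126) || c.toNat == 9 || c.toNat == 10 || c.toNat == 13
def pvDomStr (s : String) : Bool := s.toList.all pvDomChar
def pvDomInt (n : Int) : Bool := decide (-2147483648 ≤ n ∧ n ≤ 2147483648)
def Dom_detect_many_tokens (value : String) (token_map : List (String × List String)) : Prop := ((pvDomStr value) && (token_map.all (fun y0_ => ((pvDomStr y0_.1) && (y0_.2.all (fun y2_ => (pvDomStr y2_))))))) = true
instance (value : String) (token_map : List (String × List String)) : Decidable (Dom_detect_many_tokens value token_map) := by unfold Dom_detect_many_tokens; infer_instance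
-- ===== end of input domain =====

-- ===== PORT A =====
-- B replaces per-alias substring searches by one precomputed substring index; return values proved equal.
-- inner loop of A: 'for a in aliases: if a and a in haystack: found.append(canon); break'
-- (reports whether the break-appending hit happens)
def pvAliasHit (haystack : String) : List String → Bool
  | [] => false
  | a :: rest => if (a != "") && PySem.Str.isIn a haystack then true else pvAliasHit haystack rest

def detect_many_tokens (value : String) (token_map : List (String × List String)) : List String :=
  let haystack := PySem.Str.upper value
  token_map.foldl (fun found p => if pvAliasHit haystack p.2 then found ++ [p.1] else found) []

-- ===== PORT B =====
-- all substrings haystack[i:i+l+1], i in range(len(haystack)), l in range(maxlen)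
def pvSubsList (h : List Char) (maxlen : Nat) : List (List Char) :=
  (List.range h.length).flatMap (fun (i : Nat) =>
    (List.range maxlen).map (fun (l : Nat) =>
      PySem.List.slice h (some (i : Int)) (some ((i : Int) + (l : Int) + 1))))

def detect_many_tokens_alt (value : String) (token_map : List (String × List String)) : List String :=
  let h := PySem.Chars.upper value.toList
  let maxlen : Nat := token_map.foldl (fun m p => p.2.foldl (fun m a => max m a.toList.length) m) 0
  let subs : PySem.Set (List Char) := PySem.Set.ofList (pvSubsList h maxlen)
  (token_map.filter (fun p => p.2.any (fun a => PySem.Set.contains subs a.toList))).map (fun p => p.1)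

-- ===== PRECONDITION & SPEC =====
def Spec_detect_many_tokens (value : String) (token_map : List (String × List String)) (out : List String) : Prop := out = detect_many_tokens_alt value token_map
instance (value : String) (token_map : List (String × List String)) (out : List String) : Decidable (Spec_detect_many_tokens value token_map out) := by unfold Spec_detect_many_tokens; infer_instance

-- ===== CLAIM (what is proved, stated in full; the proofs are below) =====
def Claim_equal_detect_many_tokens : Prop := ∀ (value : String) (token_map : List (String × List String)), Dom_detect_many_tokens value token_map → Spec_detect_many_tokens value token_map (detect_many_tokens value token_map)

-- ===== LEMMAS AND PROOFS =====

-- A's inner loop is an 'any'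
theorem pvAliasHit_eq_any (haystack : String) (aliases : List String) :
    pvAliasHit haystack aliases = aliases.any (fun a => (a != "") && PySem.Str.isIn a haystack) := by
  induction aliases with
  | nil => rfl
  | cons a rest ih =>
      rw [show pvAliasHit haystack (a :: rest)
            = if ((a != "") && PySem.Str.isIn a haystack) = true then true
              else pvAliasHit haystack rest from rfl,
          List.any_cons, ih]
      cases hcb : ((a != "") && PySem.Str.isIn a haystack) <;> simp

-- membership in the substring index
theorem mem_pvSubsList_iff (h a : List Char) (maxlen : Nat) (hlen : a.length ≤ maxlen) :
    a ∈ pvSubsList h maxlen ↔ (a ≠ [] ∧ a <:+: h) := by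
  unfold pvSubsList
  constructor
  · intro hx
    obtain ⟨i, hi, hx2⟩ := List.mem_flatMap.mp hx
    obtain ⟨l, hl, hsl⟩ := List.mem_map.mp hx2
    have hi' : i < h.length := List.mem_range.mp hi
    have hslice : PySem.List.slice h (some (i : Int)) (some ((i : Int) + (l : Int) + 1))
        = (h.drop i).take (l + 1) := by
      have := PySem.List.slice_natCast_add h i (l + 1)
      push_cast at this ⊢
      exact this
    rw [hslice] at hsl
    subst hsl
    constructor
    · have hpos : 0 < ((h.drop i).take (l + 1)).length := by
        simp [List.length_take, List.length_drop]
        omega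
      exact List.ne_nil_of_length_pos hpos
    · have h1 : (h.drop i).take (l + 1) <+: h.drop i := List.take_prefix _ _
      have h2 : h.drop i <:+ h := List.drop_suffix i h
      rcases h1 with ⟨r, hr⟩
      rcases h2 with ⟨p, hp⟩
      exact ⟨p, r, by rw [List.append_assoc, hr, hp]⟩
  · rintro ⟨hne, p, s, hps⟩
    have hl1 : 1 ≤ a.length := by
      rcases a with _ | _ <;> simp_all
    apply List.mem_flatMap.mpr
    refine ⟨p.length, List.mem_range.mpr ?_, ?_⟩
    · have : h.length = p.length + a.length + s.length := by
        rw [← hps]; simp only [List.length_append]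
      omega
    · apply List.mem_map.mpr
      refine ⟨a.length - 1, List.mem_range.mpr (by omega), ?_⟩
      have hslice : PySem.List.slice h (some (p.length : Int)) (some ((p.length : Int) + ((a.length - 1 : Nat) : Int) + 1))
          = (h.drop p.length).take ((a.length - 1) + 1) := by
        have := PySem.List.slice_natCast_add h p.length ((a.length - 1) + 1)
        push_cast at this ⊢
        exact this
      rw [hslice, ← hps]
      have hdrop : (p ++ (a ++ s)).drop p.length = a ++ s := List.drop_left
      rw [show p ++ a ++ s = p ++ (a ++ s) by simp, hdrop]
      rw [Nat.sub_add_cancel hl1]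
      exact List.take_left

-- every alias length is bounded by B's running max
theorem pvMaxlen_bound (tm : List (String × List String)) (init : Nat) :
    (∀ p ∈ tm, ∀ a ∈ p.2, a.toList.length ≤
      tm.foldl (fun m p => p.2.foldl (fun m a => max m a.toList.length) m) init) ∧
    init ≤ tm.foldl (fun m p => p.2.foldl (fun m a => max m a.toList.length) m) init := by
  induction tm generalizing init with
  | nil => simp
  | cons q rest ih =>
      simp only [List.foldl_cons]
      set init' := q.2.foldl (fun m a => max m a.toList.length) init with hinit'
      obtain ⟨ih1, ih2⟩ := ih init'
      refine ⟨?_, ?_⟩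
      · intro p hp a ha
        rcases List.mem_cons.mp hp with rfl | hp'
        · have hb := (PySem.List.le_foldl_max_nat p.2 (fun a => a.toList.length) init).2 a ha
          exact le_trans hb ih2
        · exact ih1 p hp' a ha
      · have := (PySem.List.le_foldl_max_nat q.2 (fun a => a.toList.length) init).1
        exact le_trans this ih2

-- ===== VERDICT (by name: the statement is the Claim_ definition above) =====
theorem detect_many_tokens_spec : Claim_equal_detect_many_tokens := by
  intro value token_map _
  unfold Spec_detect_many_tokens detect_many_tokens detect_many_tokens_alt
  simp only
  rw [PySem.List.foldl_append_if]
  simp only [List.nil_append]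
  congr 1
  apply List.filter_congr
  intro p hp
  rw [pvAliasHit_eq_any]
  apply PySem.List.any_congr_mem
  intro a ha
  have hbound := (pvMaxlen_bound token_map 0).1 p hp a ha
  have hmem := mem_pvSubsList_iff (PySem.Chars.upper value.toList) a.toList _ hbound
  rw [Bool.eq_iff_iff]
  simp only [Bool.and_eq_true, bne_iff_ne, ne_eq]
  rw [PySem.Str.isIn_iff_infix, PySem.Set.contains_iff, PySem.Set.mem_ofList, hmem]
  simp [PySem.Str.toList_upper, String.toList_eq_nil_iff]
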